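-- pv_equiv track=rewrite | github.com/AntonyXXu/Learning | Python practice/LeetCode/reading_vertically.py | readingVertically
-- ===== SOURCE A (Python) =====
-- def readingVertically(arr):
--     ans = ""
--     longest = 0
--     for i in range(len(arr)):
--         longest = max(len(arr[i]), longest)
--     for col in range(longest):
--         for i in range(len(arr)):
--             if col < len(arr[i]):
--                 ans += arr[i][col]
--
--     return ans
-- ===== SOURCE B (Python) =====
-- def readingVertically(arr):
--     active = [(w, 0) for w in arr if w]
--     out = []
--     while active:
--         out.extend(w[p] for w, p in active)
--         active = [(w, p + 1) for w, p in active if p + 1 < len(w)]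
--     return "".join(out)
-- ===== Notes on version B (the rewrite author's own statement) =====
-- stated objective: alternative
-- what changed: Instead of rescanning all n words for every column up to the maximum length, B keeps a worklist of (word, position) pairs, emits one column per round and drops finished words, so each round touches only still-active words.
import Mathlib
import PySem

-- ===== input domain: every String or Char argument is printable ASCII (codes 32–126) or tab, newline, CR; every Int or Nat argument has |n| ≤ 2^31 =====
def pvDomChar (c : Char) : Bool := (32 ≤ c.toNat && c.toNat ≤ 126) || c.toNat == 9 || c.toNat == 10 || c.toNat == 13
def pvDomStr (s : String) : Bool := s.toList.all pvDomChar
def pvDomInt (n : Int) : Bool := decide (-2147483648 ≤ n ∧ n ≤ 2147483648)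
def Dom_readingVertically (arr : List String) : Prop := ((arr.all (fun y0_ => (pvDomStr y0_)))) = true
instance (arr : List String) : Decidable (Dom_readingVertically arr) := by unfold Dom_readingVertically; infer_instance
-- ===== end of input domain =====

-- B replaces A's rescan of all words for every column by a worklist of (word, position)
-- pairs from which finished words are removed (objective: alternative).


-- ===== PORT A =====
-- A's first loop: longest = max(len(arr[i]), longest) over i in range(len(arr))
def rvLongest (arr : List String) : Int :=
  (PySem.List.pyRange 0 (PySem.List.len arr)).foldl
    (fun longest i => max (PySem.Str.len (PySem.List.pyGetD arr i "")) longest) 0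

def readingVertically (arr : List String) : String :=
  String.ofList
    ((PySem.List.pyRange 0 (rvLongest arr)).foldl
      (fun ans col =>
        (PySem.List.pyRange 0 (PySem.List.len arr)).foldl
          (fun ans i =>
            if col < PySem.Str.len (PySem.List.pyGetD arr i "") then
              ans ++ [PySem.List.pyGetD (PySem.List.pyGetD arr i "").toList col ' ']
            else ans)
          ans)
      [])

-- ===== PORT B =====
-- next round's worklist: advance each pair, dropping words whose last char was just read
def rvNext (active : List (List Char × Nat)) : List (List Char × Nat) :=
  active.filterMap (fun wp => if wp.2 + 1 < wp.1.length then some (wp.1, wp.2 + 1) else none)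

-- measure for the while loop (used by rvLoop's decreasing_by)
def rvMu (active : List (List Char × Nat)) : Nat :=
  (active.map (fun wp => wp.1.length - wp.2)).sum + active.length

theorem rvNext_le (l : List (List Char × Nat)) :
    ((rvNext l).map (fun wp => wp.1.length - wp.2)).sum + (rvNext l).length
      ≤ (l.map (fun wp => wp.1.length - wp.2)).sum := by
  induction l with
  | nil => simp [rvNext]
  | cons wp rest ih =>
    simp only [rvNext] at ih ⊢
    by_cases h : wp.2 + 1 < wp.1.length
    · simp only [List.filterMap_cons, if_pos h, List.map_cons, List.sum_cons, List.length_cons]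
      omega
    · simp only [List.filterMap_cons, if_neg h, List.map_cons, List.sum_cons]
      omega

theorem rvMu_next_lt (active : List (List Char × Nat)) (h : active ≠ []) :
    rvMu (rvNext active) < rvMu active := by
  have h2 := rvNext_le active
  have hl : 0 < active.length := List.length_pos_iff.mpr h
  unfold rvMu
  omega

-- the while loop: emit the current column from the active words, then advance
def rvLoop (active : List (List Char × Nat)) : List Char :=
  if h : active = [] then []
  else (active.map (fun wp => wp.1.getD wp.2 ' ')) ++ rvLoop (rvNext active)
termination_by rvMu active
decreasing_by exact rvMu_next_lt _ h

def readingVertically_alt (arr : List String) : String :=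
  String.ofList
    (rvLoop (arr.filterMap (fun w => if w.toList = [] then none else some (w.toList, 0))))

-- ===== PRECONDITION & SPEC =====
def Spec_readingVertically (arr : List String) (out : String) : Prop := out = readingVertically_alt arr
instance (arr : List String) (out : String) : Decidable (Spec_readingVertically arr out) := by unfold Spec_readingVertically; infer_instance

-- ===== CLAIM (what is proved, stated in full; the proofs are below) =====
def Claim_equal_readingVertically : Prop := ∀ (arr : List String), Dom_readingVertically arr → Spec_readingVertically arr (readingVertically arr)

-- ===== LEMMAS AND PROOFS =====

-- the column-c characters, in word order (common description of both programs)
def colC (ws : List (List Char)) (c : Nat) : List Char :=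
  (ws.filter (fun w => c < w.length)).map (fun w => w.getD c ' ')

-- the worklist B holds at the start of round c
def actAt (ws : List (List Char)) (c : Nat) : List (List Char × Nat) :=
  ws.filterMap (fun w => if c < w.length then some (w, c) else none)

theorem map_actAt (ws : List (List Char)) (c : Nat) :
    (actAt ws c).map (fun wp => wp.1.getD wp.2 ' ') = colC ws c := by
  induction ws with
  | nil => rfl
  | cons w rest ih =>
    simp only [actAt, colC, List.filterMap_cons, List.filter_cons] at ih ⊢
    by_cases h : c < w.length
    · simp [h]
      simpa using ih
    · simp [h]
      simpa using ih

theorem rvNext_actAt (ws : List (List Char)) (c : Nat) :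
    rvNext (actAt ws c) = actAt ws (c + 1) := by
  induction ws with
  | nil => rfl
  | cons w rest ih =>
    simp only [actAt, rvNext, List.filterMap_cons] at ih ⊢
    by_cases h1 : c + 1 < w.length
    · have h0 : c < w.length := by omega
      simp [h0, h1, ih]
    · by_cases h0 : c < w.length <;> simp [h0, h1, ih]

theorem actAt_eq_nil_iff (ws : List (List Char)) (c : Nat) :
    actAt ws c = [] ↔ ∀ w ∈ ws, w.length ≤ c := by
  simp only [actAt, List.filterMap_eq_nil_iff]
  constructor
  · intro h w hw
    have := h w hw
    by_contra hc
    simp [Nat.lt_of_not_le hc] at this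
  · intro h w hw
    simp [Nat.not_lt.mpr (h w hw)]

theorem colC_eq_nil (ws : List (List Char)) (c : Nat) (h : ∀ w ∈ ws, w.length ≤ c) :
    colC ws c = [] := by
  simp only [colC, List.map_eq_nil_iff, List.filter_eq_nil_iff]
  intro w hw
  simpa using Nat.not_lt.mpr (h w hw)

-- main B lemma: the loop starting at round c reads columns c, c+1, …, c+L-1
theorem rvLoop_actAt (ws : List (List Char)) (L : Nat) :
    ∀ c : Nat, (∀ w ∈ ws, w.length ≤ c + L) →
      rvLoop (actAt ws c) = ((List.range L).map (fun k => colC ws (c + k))).flatten := by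
  induction L with
  | zero =>
    intro c h
    rw [rvLoop]
    simp [(actAt_eq_nil_iff ws c).mpr (by simpa using h)]
  | succ L ih =>
    intro c h
    by_cases hnil : actAt ws c = []
    · have hle : ∀ w ∈ ws, w.length ≤ c := (actAt_eq_nil_iff ws c).mp hnil
      rw [rvLoop]
      simp only [hnil, dif_pos]
      symm
      simp only [List.flatten_eq_nil_iff, List.mem_map, List.mem_range]
      rintro l ⟨k, -, rfl⟩
      exact colC_eq_nil ws (c + k) (fun w hw => le_trans (hle w hw) (Nat.le_add_right _ _))
    · rw [rvLoop]
      simp only [hnil, dif_neg, not_false_iff]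
      rw [map_actAt, rvNext_actAt, ih (c + 1) (by intro w hw; have := h w hw; omega)]
      rw [List.range_succ_eq_map]
      simp only [List.map_cons, List.map_map, List.flatten_cons, Nat.add_zero]
      have hmap : (List.range L).map ((fun k => colC ws (c + k)) ∘ Nat.succ)
          = (List.range L).map (fun k => colC ws (c + 1 + k)) := by
        apply List.map_congr_left
        intro k _
        simp only [Function.comp_apply]
        congr 1
        omega
      rw [hmap]

-- B's initial worklist is the round-0 worklist
theorem alt_init (arr : List String) :
    arr.filterMap (fun w => if w.toList = [] then none else some (w.toList, 0))
      = actAt (arr.map String.toList) 0 := by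
  induction arr with
  | nil => rfl
  | cons w rest ih =>
    simp only [actAt, List.map_cons, List.filterMap_cons] at ih ⊢
    by_cases h : w.toList = []
    · have h2 : ¬ (0 < w.toList.length) := by simp [h]
      rw [if_pos h, if_neg h2]
      exact ih
    · have h2 : 0 < w.toList.length := List.length_pos_iff.mpr h
      rw [if_neg h, if_pos h2]
      exact congrArg _ ih

-- A's inner loop over all words appends column c to ans
theorem inner_fold (arr : List String) (c : Nat) (ans : List Char) :
    arr.foldl
      (fun ans w =>
        if (c : Int) < PySem.Str.len w then ans ++ [PySem.List.pyGetD w.toList (c : Int) ' ']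
        else ans)
      ans
    = ans ++ colC (arr.map String.toList) c := by
  induction arr generalizing ans with
  | nil => simp [colC]
  | cons w rest ih =>
    by_cases h : c < w.toList.length
    · have hc : (c : Int) < PySem.Str.len w := by rw [PySem.Str.len_eq]; exact_mod_cast h
      have h' : c < w.length := by simpa using h
      rw [List.foldl_cons, if_pos hc, ih]
      simp [colC, h']
    · have hc : ¬ (c : Int) < PySem.Str.len w := by rw [PySem.Str.len_eq]; exact_mod_cast h
      have h' : ¬ c < w.length := by simpa using h
      rw [List.foldl_cons, if_neg hc, ih]
      simp [colC, h']

-- A's outer loop, over any list of column numbers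
theorem outer_fold (arr : List String) (cols : List Nat) (ans : List Char) :
    cols.foldl
      (fun ans (k : Nat) =>
        (PySem.List.pyRange 0 (PySem.List.len arr)).foldl
          (fun ans i =>
            if (k : Int) < PySem.Str.len (PySem.List.pyGetD arr i "") then
              ans ++ [PySem.List.pyGetD (PySem.List.pyGetD arr i "").toList (k : Int) ' ']
            else ans)
          ans)
      ans
    = ans ++ (cols.map (fun k => colC (arr.map String.toList) k)).flatten := by
  induction cols generalizing ans with
  | nil => simp
  | cons k rest ih =>
    rw [List.foldl_cons,
        PySem.List.foldl_pyRange_zero_pyGetD arr ""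
          (fun ans w =>
            if (k : Int) < PySem.Str.len w then ans ++ [PySem.List.pyGetD w.toList (k : Int) ' ']
            else ans)
          ans,
        inner_fold, ih]
    simp

-- A's first loop computes an upper bound on all word lengths
theorem rvLongest_fold (arr : List String) :
    rvLongest arr = arr.foldl (fun acc w => max acc (PySem.Str.len w)) 0 := by
  unfold rvLongest
  have hcomm :
      (fun (longest : Int) (i : Int) =>
          max (PySem.Str.len (PySem.List.pyGetD arr i "")) longest)
        = (fun acc i => max acc (PySem.Str.len (PySem.List.pyGetD arr i ""))) := by
    funext a i
    exact max_comm _ _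
  rw [hcomm]
  exact PySem.List.foldl_pyRange_zero_pyGetD arr "" (fun a w => max a (PySem.Str.len w)) 0

theorem rvLongest_bound (arr : List String) (w : String) (hw : w ∈ arr) :
    w.toList.length ≤ (rvLongest arr).toNat := by
  have h := (PySem.List.le_foldl_max_int arr PySem.Str.len 0).2 w hw
  rw [← rvLongest_fold] at h
  rw [PySem.Str.len_eq] at h
  omega

theorem readingVertically_eq (arr : List String) :
    readingVertically arr = readingVertically_alt arr := by
  unfold readingVertically readingVertically_alt
  rw [alt_init,
      rvLoop_actAt (arr.map String.toList) (rvLongest arr).toNat 0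
        (by intro w hw
            simp only [List.mem_map] at hw
            obtain ⟨s, hs, rfl⟩ := hw
            simpa using rvLongest_bound arr s hs),
      show PySem.List.pyRange 0 (rvLongest arr)
          = (List.range (rvLongest arr).toNat).map (fun k : Nat => (k : Int))
        from PySem.List.pyRange_zero _,
      List.foldl_map]
  have hmap : (List.range (rvLongest arr).toNat).map
        (fun k => colC (arr.map String.toList) (0 + k))
      = (List.range (rvLongest arr).toNat).map (fun k => colC (arr.map String.toList) k) := by
    simp
  rw [hmap]
  exact congrArg String.ofList (outer_fold arr (List.range (rvLongest arr).toNat) [])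

-- ===== VERDICT (by name: the statement is the Claim_ definition above) =====
theorem readingVertically_spec : Claim_equal_readingVertically := by
  intro arr _
  unfold Spec_readingVertically
  exact readingVertically_eq arr
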